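-- pv_equiv track=rewrite | github.com/BruninLima/Project-Sudoku | sudoku.py | get_blocked_idxs
-- ===== SOURCE A (Python) =====
-- def get_blocked_idxs(idxs):
--     " Returns a set of all the blocked indexes from the given indexes "
--     blocked_idxs = set()
--
--     for idx in idxs:
--
--         q,r = divmod(idx, 9) # idx for the columns/lines
--         a,b = (q//3)*3, (r//3)*3  # idx for the 3x3 block
--
--         for k in range(9):
--
--             row = 9*q + k
--             col = 9*k + r
--
--             blocked_idxs.add(row) # blocked lines
--             blocked_idxs.add(col) # blocked columns
--
--         for m in range(a, a+3):
--             for n in range(b, b+3):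
--
--                 sqr = 9*m + n
--                 blocked_idxs.add(sqr)
--
--     return blocked_idxs
-- ===== SOURCE B (Python) =====
-- def get_blocked_idxs(idxs):
--     " Returns a set of all the blocked indexes from the given indexes "
--     # Pass 1: collect the distinct affected groups (row numbers, column
--     # residues, 3x3-block corners) instead of expanding per input index.
--     rows = set()
--     cols = set()
--     corners = set()
--     for idx in idxs:
--         q, r = divmod(idx, 9)
--         rows.add(q)
--         cols.add(r)
--         corners.add(((q // 3) * 3, (r // 3) * 3))
--     # Pass 2: expand each collected group once.
--     blocked_idxs = set()
--     for q in rows: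
--         for k in range(9):
--             blocked_idxs.add(9 * q + k)
--     for r in cols:
--         for k in range(9):
--             blocked_idxs.add(9 * k + r)
--     for (a, b) in corners:
--         for m in range(a, a + 3):
--             for n in range(b, b + 3):
--                 blocked_idxs.add(9 * m + n)
--     return blocked_idxs
-- ===== Notes on version B (the rewrite author's own statement) =====
-- stated objective: alternative
-- what changed: B collects the distinct row numbers, column residues and 3x3-block corners of the inputs in one pass, then expands each collected group exactly once, instead of re-expanding all 21 blocked cells for every input index.
import Mathlib
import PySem

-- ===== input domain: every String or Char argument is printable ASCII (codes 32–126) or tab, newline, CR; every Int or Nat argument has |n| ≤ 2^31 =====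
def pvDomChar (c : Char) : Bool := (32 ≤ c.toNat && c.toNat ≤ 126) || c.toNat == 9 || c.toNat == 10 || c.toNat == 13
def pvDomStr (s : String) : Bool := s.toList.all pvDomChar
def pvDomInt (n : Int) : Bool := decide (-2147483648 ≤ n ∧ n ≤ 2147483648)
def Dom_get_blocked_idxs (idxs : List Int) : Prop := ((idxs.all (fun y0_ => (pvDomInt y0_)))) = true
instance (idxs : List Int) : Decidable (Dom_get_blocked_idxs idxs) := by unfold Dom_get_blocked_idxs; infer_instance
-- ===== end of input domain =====

-- B collects the distinct row/column/block groups in one pass and expands each group once,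
-- instead of expanding all 21 blocked cells per input index; on group-heavy inputs this does less set work, though a timing run did not confirm a ≥1.5× speedup on random inputs.
-- Both Pythons return a set (unordered); both ports render that set in ascending order,
-- which is faithful because a Python set carries no observable order.

-- ===== PORT A =====
-- body of A's 'for idx in idxs' loop
def pvAstep (s : PySem.Set Int) (idx : Int) : PySem.Set Int :=
  let q := PySem.Int.floordiv idx 9
  let r := PySem.Int.mod idx 9
  let a := (PySem.Int.floordiv q 3) * 3
  let b := (PySem.Int.floordiv r 3) * 3
  let s := (PySem.List.pyRange 0 9 1).foldl
    (fun s k => PySem.Set.add (PySem.Set.add s (9 * q + k)) (9 * k + r)) s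
  (PySem.List.pyRange a (a + 3) 1).foldl (fun s m =>
    (PySem.List.pyRange b (b + 3) 1).foldl (fun s n => PySem.Set.add s (9 * m + n)) s) s

def get_blocked_idxs (idxs : List Int) : List Int :=
  let blocked_idxs := idxs.foldl pvAstep PySem.Set.empty
  PySem.List.sorted blocked_idxs (fun x => x) false

-- ===== PORT B =====
-- body of B's first loop: add q, r and the block corner to the three key sets
def pvBstep (t : PySem.Set Int × PySem.Set Int × PySem.Set (Int × Int)) (idx : Int) :
    PySem.Set Int × PySem.Set Int × PySem.Set (Int × Int) :=
  let q := PySem.Int.floordiv idx 9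
  let r := PySem.Int.mod idx 9
  (PySem.Set.add t.1 q, PySem.Set.add t.2.1 r,
   PySem.Set.add t.2.2 ((PySem.Int.floordiv q 3) * 3, (PySem.Int.floordiv r 3) * 3))

-- B's second pass: expand each collected group once
def pvBexpand (t : PySem.Set Int × PySem.Set Int × PySem.Set (Int × Int)) : PySem.Set Int :=
  let blocked := t.1.foldl (fun s q =>
      (PySem.List.pyRange 0 9 1).foldl (fun s k => PySem.Set.add s (9 * q + k)) s)
    PySem.Set.empty
  let blocked := t.2.1.foldl (fun s r =>
      (PySem.List.pyRange 0 9 1).foldl (fun s k => PySem.Set.add s (9 * k + r)) s)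
    blocked
  t.2.2.foldl (fun s ab =>
      (PySem.List.pyRange ab.1 (ab.1 + 3) 1).foldl (fun s m =>
        (PySem.List.pyRange ab.2 (ab.2 + 3) 1).foldl (fun s n => PySem.Set.add s (9 * m + n)) s) s)
    blocked

def get_blocked_idxs_alt (idxs : List Int) : List Int :=
  let keys := idxs.foldl pvBstep (PySem.Set.empty, PySem.Set.empty, PySem.Set.empty)
  PySem.List.sorted (pvBexpand keys) (fun x => x) false

-- ===== PRECONDITION & SPEC =====
def Spec_get_blocked_idxs (idxs : List Int) (out : List Int) : Prop := out = get_blocked_idxs_alt idxs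
instance (idxs : List Int) (out : List Int) : Decidable (Spec_get_blocked_idxs idxs out) := by unfold Spec_get_blocked_idxs; infer_instance

-- ===== CLAIM (what is proved, stated in full; the proofs are below) =====
def Claim_equal_get_blocked_idxs : Prop := ∀ (idxs : List Int), Dom_get_blocked_idxs idxs → Spec_get_blocked_idxs idxs (get_blocked_idxs idxs)

-- ===== LEMMAS AND PROOFS =====

-- the cells one input index blocks (row part, column part, block part), phrased on A's ranges
def pvRowC (idx x : Int) : Prop :=
  ∃ k ∈ PySem.List.pyRange 0 9 1, x = 9 * PySem.Int.floordiv idx 9 + k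
def pvColC (idx x : Int) : Prop :=
  ∃ k ∈ PySem.List.pyRange 0 9 1, x = 9 * k + PySem.Int.mod idx 9
def pvSqrC (a b x : Int) : Prop :=
  ∃ m ∈ PySem.List.pyRange a (a + 3) 1, ∃ n ∈ PySem.List.pyRange b (b + 3) 1, x = 9 * m + n
def pvCornA (idx : Int) : Int := (PySem.Int.floordiv (PySem.Int.floordiv idx 9) 3) * 3
def pvCornB (idx : Int) : Int := (PySem.Int.floordiv (PySem.Int.mod idx 9) 3) * 3

-- generic loop shapes
theorem pv_mem_foldl_step {β : Type} (step : PySem.Set Int → β → PySem.Set Int)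
    (P : β → Int → Prop)
    (hstep : ∀ s b x, x ∈ step s b ↔ x ∈ s ∨ P b x) :
    ∀ (l : List β) (s : PySem.Set Int) (x : Int),
      x ∈ l.foldl step s ↔ x ∈ s ∨ ∃ b ∈ l, P b x := by
  intro l
  induction l with
  | nil => simp
  | cons b l ih => intro s x; simp [List.foldl, ih, hstep]; tauto

theorem pv_nodup_foldl_step {β : Type} (step : PySem.Set Int → β → PySem.Set Int)
    (hstep : ∀ s b, List.Nodup s → List.Nodup (step s b)) :
    ∀ (l : List β) (s : PySem.Set Int), List.Nodup s → List.Nodup (l.foldl step s) := by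
  intro l
  induction l with
  | nil => intro s h; simpa
  | cons b l ih => intro s h; exact ih _ (hstep _ _ h)

theorem pv_mem_foldl_add2 {β : Type} (f g : β → Int) :
    ∀ (l : List β) (s : PySem.Set Int) (x : Int),
      x ∈ l.foldl (fun s b => PySem.Set.add (PySem.Set.add s (f b)) (g b)) s ↔
        x ∈ s ∨ ∃ b ∈ l, x = f b ∨ x = g b := by
  intro l
  induction l with
  | nil => simp
  | cons b l ih => intro s x; simp [List.foldl, ih, PySem.Set.mem_add, or_assoc]

theorem pv_nodup_foldl_add {β : Type} (f : β → Int) (l : List β) (s : PySem.Set Int)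
    (h : List.Nodup s) :
    List.Nodup (l.foldl (fun s b => PySem.Set.add s (f b)) s) :=
  pv_nodup_foldl_step _ (fun _ _ hs => PySem.Set.nodup_add _ _ hs) l s h

-- the 3x3 block loop
theorem pv_mem_sqr (a b : Int) (s : PySem.Set Int) (x : Int) :
    x ∈ (PySem.List.pyRange a (a + 3) 1).foldl (fun s m =>
        (PySem.List.pyRange b (b + 3) 1).foldl (fun s n => PySem.Set.add s (9 * m + n)) s) s ↔
      x ∈ s ∨ pvSqrC a b x := by
  exact pv_mem_foldl_step _ (fun m x => ∃ n ∈ PySem.List.pyRange b (b + 3) 1, x = 9 * m + n)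
    (fun s m x => PySem.Set.mem_foldl_add _ _ _ _) _ s x

-- A's per-index step
theorem pv_mem_Astep (s : PySem.Set Int) (idx x : Int) :
    x ∈ pvAstep s idx ↔ x ∈ s ∨ (pvRowC idx x ∨ pvColC idx x) ∨ pvSqrC (pvCornA idx) (pvCornB idx) x := by
  unfold pvAstep
  rw [pv_mem_sqr, pv_mem_foldl_add2]
  unfold pvRowC pvColC pvCornA pvCornB
  constructor
  · rintro ((h | ⟨k, hk, h | h⟩) | h)
    · exact Or.inl h
    · exact Or.inr (Or.inl (Or.inl ⟨k, hk, h⟩))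
    · exact Or.inr (Or.inl (Or.inr ⟨k, hk, h⟩))
    · exact Or.inr (Or.inr h)
  · rintro (h | (⟨k, hk, h⟩ | ⟨k, hk, h⟩) | h)
    · exact Or.inl (Or.inl h)
    · exact Or.inl (Or.inr ⟨k, hk, Or.inl h⟩)
    · exact Or.inl (Or.inr ⟨k, hk, Or.inr h⟩)
    · exact Or.inr h

theorem pv_nodup_Astep (s : PySem.Set Int) (idx : Int) (h : List.Nodup s) :
    List.Nodup (pvAstep s idx) := by
  unfold pvAstep
  exact pv_nodup_foldl_step _
    (fun s m hs => pv_nodup_foldl_add _ _ _ hs) _ _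
    (pv_nodup_foldl_step _
      (fun s k hs => PySem.Set.nodup_add _ _ (PySem.Set.nodup_add _ _ hs)) _ _ h)

-- A's whole set
theorem pv_mem_A (idxs : List Int) (x : Int) :
    x ∈ idxs.foldl pvAstep PySem.Set.empty ↔
      ∃ idx ∈ idxs, (pvRowC idx x ∨ pvColC idx x) ∨ pvSqrC (pvCornA idx) (pvCornB idx) x := by
  rw [pv_mem_foldl_step pvAstep _ pv_mem_Astep]
  simp [PySem.Set.empty]

theorem pv_nodup_A (idxs : List Int) : List.Nodup (idxs.foldl pvAstep PySem.Set.empty) :=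
  pv_nodup_foldl_step pvAstep pv_nodup_Astep idxs _ (by simp [PySem.Set.empty])

-- B's key-collection loop, one component at a time
theorem pv_mem_keys1 (l : List Int) :
    ∀ (t : PySem.Set Int × PySem.Set Int × PySem.Set (Int × Int)) (y : Int),
      y ∈ (l.foldl pvBstep t).1 ↔ y ∈ t.1 ∨ ∃ idx ∈ l, y = PySem.Int.floordiv idx 9 := by
  induction l with
  | nil => simp
  | cons b l ih => intro t y; simp [List.foldl, ih, pvBstep, PySem.Set.mem_add]; tauto

theorem pv_mem_keys2 (l : List Int) :
    ∀ (t : PySem.Set Int × PySem.Set Int × PySem.Set (Int × Int)) (y : Int),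
      y ∈ (l.foldl pvBstep t).2.1 ↔ y ∈ t.2.1 ∨ ∃ idx ∈ l, y = PySem.Int.mod idx 9 := by
  induction l with
  | nil => simp
  | cons b l ih => intro t y; simp [List.foldl, ih, pvBstep, PySem.Set.mem_add]; tauto

theorem pv_mem_keys3 (l : List Int) :
    ∀ (t : PySem.Set Int × PySem.Set Int × PySem.Set (Int × Int)) (y : Int × Int),
      y ∈ (l.foldl pvBstep t).2.2 ↔ y ∈ t.2.2 ∨ ∃ idx ∈ l, y = (pvCornA idx, pvCornB idx) := by
  induction l with
  | nil => simp
  | cons b l ih =>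
      intro t y
      simp [List.foldl, ih, pvBstep, PySem.Set.mem_add, pvCornA, pvCornB]; tauto

-- B's expansion pass
theorem pv_mem_Bexpand (t : PySem.Set Int × PySem.Set Int × PySem.Set (Int × Int)) (x : Int) :
    x ∈ pvBexpand t ↔
      (∃ q ∈ t.1, ∃ k ∈ PySem.List.pyRange 0 9 1, x = 9 * q + k) ∨
      (∃ r ∈ t.2.1, ∃ k ∈ PySem.List.pyRange 0 9 1, x = 9 * k + r) ∨
      (∃ ab ∈ t.2.2, pvSqrC ab.1 ab.2 x) := by
  unfold pvBexpand
  rw [pv_mem_foldl_step _ (fun ab x => pvSqrC ab.1 ab.2 x)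
        (fun s ab x => pv_mem_sqr ab.1 ab.2 s x),
      pv_mem_foldl_step _ (fun r x => ∃ k ∈ PySem.List.pyRange 0 9 1, x = 9 * k + r)
        (fun s r x => PySem.Set.mem_foldl_add _ _ _ _),
      pv_mem_foldl_step _ (fun q x => ∃ k ∈ PySem.List.pyRange 0 9 1, x = 9 * q + k)
        (fun s q x => PySem.Set.mem_foldl_add _ _ _ _)]
  simp [PySem.Set.empty, or_assoc]

theorem pv_nodup_Bexpand (t : PySem.Set Int × PySem.Set Int × PySem.Set (Int × Int)) :
    List.Nodup (pvBexpand t) := by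
  unfold pvBexpand
  exact pv_nodup_foldl_step _
    (fun s ab hs => pv_nodup_foldl_step _ (fun s m hs => pv_nodup_foldl_add _ _ _ hs) _ _ hs) _ _
    (pv_nodup_foldl_step _ (fun s r hs => pv_nodup_foldl_add _ _ _ hs) _ _
      (pv_nodup_foldl_step _ (fun s q hs => pv_nodup_foldl_add _ _ _ hs) _ _
        (by simp [PySem.Set.empty])))

-- the two internal sets have the same members
theorem pv_same_members (idxs : List Int) (x : Int) :
    x ∈ idxs.foldl pvAstep PySem.Set.empty ↔
      x ∈ pvBexpand (idxs.foldl pvBstep (PySem.Set.empty, PySem.Set.empty, PySem.Set.empty)) := by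
  rw [pv_mem_A, pv_mem_Bexpand]
  simp only [pv_mem_keys1, pv_mem_keys2, pv_mem_keys3]
  simp only [PySem.Set.empty, List.not_mem_nil, false_or, pvRowC, pvColC]
  constructor
  · rintro ⟨idx, hidx, (⟨k, hk, h⟩ | ⟨k, hk, h⟩) | h⟩
    · exact Or.inl ⟨_, ⟨idx, hidx, rfl⟩, k, hk, h⟩
    · exact Or.inr (Or.inl ⟨_, ⟨idx, hidx, rfl⟩, k, hk, h⟩)
    · exact Or.inr (Or.inr ⟨_, ⟨idx, hidx, rfl⟩, h⟩)
  · rintro (⟨q, ⟨idx, hidx, rfl⟩, k, hk, h⟩ | ⟨r, ⟨idx, hidx, rfl⟩, k, hk, h⟩ | ⟨ab, ⟨idx, hidx, rfl⟩, h⟩)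
    · exact ⟨idx, hidx, Or.inl (Or.inl ⟨k, hk, h⟩)⟩
    · exact ⟨idx, hidx, Or.inl (Or.inr ⟨k, hk, h⟩)⟩
    · exact ⟨idx, hidx, Or.inr h⟩

-- ===== VERDICT (by name: the statement is the Claim_ definition above) =====
theorem get_blocked_idxs_spec : Claim_equal_get_blocked_idxs := by
  intro idxs _
  unfold Spec_get_blocked_idxs get_blocked_idxs get_blocked_idxs_alt
  exact PySem.List.sorted_eq_sorted_of_perm _ _ _ (fun a b h => h)
    ((List.perm_ext_iff_of_nodup (pv_nodup_A idxs) (pv_nodup_Bexpand _)).mpr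
      (pv_same_members idxs))
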